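-- pv_equiv track=rewrite | github.com/conclancy/cs5001 | labs/lab8/readability.py | punctuation_handler
-- ===== SOURCE A (Python) =====
-- def punctuation_handler(word_list):
--     '''
--     Function: punctuation_handler
--         Calculates the number of sentences, and removes punctuation from list
--     Parameters:
--         word_list -- a list of words to analyze
--     Returns: number of sentences (int), list of words without puncuation (list)
--     '''
--
--     # constants
--     PUNCTUATION = [".", "?", "!", ":", ";"]
--
--     # variables
--     word_count = 0
--     punctuation = 0
--     return_words = []
--
--     # iterate through each word in the list
--     for word in word_list:
--
--         # count the number of words
--         word_count = word_count + 1
--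
--         # create a blank bariable called new string to store the string without
--         # punctuation
--         new_string = ""
--
--         # iterate over each character in the string
--         for character in word:
--
--             # count the number of punctuation marks
--             if character in PUNCTUATION:
--                 punctuation = punctuation + 1
--
--             # append all non-punctuation characters to the new_string
--             elif character.isalnum():
--                 new_string = new_string + character
--
--         # add the punctuatio-free string to the return word list
--         return_words.append(new_string)
--
--     return punctuation, return_words
-- ===== SOURCE B (Python) =====
-- def punctuation_handler(word_list):
--     PUNCTUATION = [".", "?", "!", ":", ";"]
--
--     # build a frequency table of every character once, then look the marks up
--     counts = {}
--     for word in word_list: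
--         for c in word:
--             counts[c] = counts.get(c, 0) + 1
--     punctuation = sum(counts.get(p, 0) for p in PUNCTUATION)
--
--     # strip each word down to its alphanumeric characters in a separate pass
--     return_words = ["".join(c for c in word if c.isalnum()) for word in word_list]
--
--     return punctuation, return_words
-- ===== Notes on version B (the rewrite author's own statement) =====
-- stated objective: alternative
-- what changed: Replaces A's single interleaved per-character pass (counting punctuation and building each stripped word in one inner loop) by a build-a-character-frequency-table-then-look-up-the-five-marks decomposition plus a separate filtering pass per word.
import Mathlib
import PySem

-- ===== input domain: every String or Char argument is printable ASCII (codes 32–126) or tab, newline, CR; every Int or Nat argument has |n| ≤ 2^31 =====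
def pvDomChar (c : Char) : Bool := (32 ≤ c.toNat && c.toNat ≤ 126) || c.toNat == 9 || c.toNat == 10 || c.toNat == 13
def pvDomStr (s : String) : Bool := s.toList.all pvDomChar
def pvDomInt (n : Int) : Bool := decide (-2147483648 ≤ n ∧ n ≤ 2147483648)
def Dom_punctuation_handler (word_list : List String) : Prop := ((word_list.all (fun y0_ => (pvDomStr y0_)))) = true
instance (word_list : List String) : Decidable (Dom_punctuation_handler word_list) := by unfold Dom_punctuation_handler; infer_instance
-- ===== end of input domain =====

-- B replaces A's single interleaved per-character pass by a character-frequency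
-- table built once and looked up for the five marks, plus a separate filtering
-- pass per word (objective: alternative decomposition, same cost).

-- ===== PORT A =====
-- PUNCTUATION constant of A (also used by B's Python, ported once)
def pvPunct : List Char := ['.', '?', '!', ':', ';']

-- A's inner loop body: count a punctuation mark, or keep an alnum character
def pvInnerStepA (st2 : Int × List Char) (character : Char) : Int × List Char :=
  if character ∈ pvPunct then (st2.1 + 1, st2.2)
  else if PySem.Chars.isalnum character then (st2.1, st2.2 ++ [character])
  else st2

-- A's outer loop body: bump word_count, run the inner loop, append new_string
def pvStepA (st : Int × Int × List String) (word : String) : Int × Int × List String :=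
  let word_count := st.1 + 1
  let inner := word.toList.foldl pvInnerStepA (st.2.1, ([] : List Char))
  (word_count, inner.1, st.2.2 ++ [String.ofList inner.2])

-- literal port of A: one fold over the words, interleaved counting/stripping
def punctuation_handler (word_list : List String) : Int × List String :=
  let r := word_list.foldl pvStepA ((0 : Int), (0 : Int), ([] : List String))
  (r.2.1, r.2.2)

-- ===== PORT B =====
-- literal port of B: build the frequency dict over all characters, sum the
-- five lookups, and strip each word by a filter comprehension
def punctuation_handler_alt (word_list : List String) : Int × List String :=
  let counts : PySem.Dict Char Int :=
    word_list.foldl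
      (fun d word => word.toList.foldl (fun d c => d.insert c (d.getD c 0 + 1)) d)
      PySem.Dict.empty
  let punctuation : Int := (pvPunct.map (fun p => counts.getD p 0)).sum
  let return_words : List String :=
    word_list.map (fun word => String.ofList (word.toList.filter PySem.Chars.isalnum))
  (punctuation, return_words)

-- ===== PRECONDITION & SPEC =====
def Spec_punctuation_handler (word_list : List String) (out : Int × List String) : Prop := out = punctuation_handler_alt word_list
instance (word_list : List String) (out : Int × List String) : Decidable (Spec_punctuation_handler word_list out) := by unfold Spec_punctuation_handler; infer_instance

-- ===== CLAIM (what is proved, stated in full; the proofs are below) =====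
def Claim_equal_punctuation_handler : Prop := ∀ (word_list : List String), Dom_punctuation_handler word_list → Spec_punctuation_handler word_list (punctuation_handler word_list)

-- ===== LEMMAS AND PROOFS =====

-- A's inner loop adds the number of punctuation marks and appends the alnum filter
theorem pvInnerA (cs : List Char) (p : Int) (s : List Char) :
    cs.foldl pvInnerStepA (p, s)
    = (p + (cs.countP (· ∈ pvPunct) : Int), s ++ cs.filter PySem.Chars.isalnum) := by
  induction cs generalizing p s with
  | nil => simp
  | cons c cs ih =>
    simp only [List.foldl_cons, List.countP_cons, List.filter_cons, pvInnerStepA]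
    by_cases hc : c ∈ pvPunct
    · have halnum : PySem.Chars.isalnum c = false := by
        simp only [pvPunct, List.mem_cons, List.not_mem_nil, or_false] at hc
        rcases hc with rfl | rfl | rfl | rfl | rfl <;> decide
      simp [hc, ih, halnum]
      ring
    · by_cases ha : PySem.Chars.isalnum c
      · simp [hc, ha, ih]
      · simp [hc, ha, ih]

-- A's outer loop, characterised
theorem pvOuterA (ws : List String) (wc p : Int) (acc : List String) :
    ws.foldl pvStepA (wc, p, acc)
    = (wc + (ws.length : Int),
       p + (((ws.map String.toList).flatten).countP (· ∈ pvPunct) : Int),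
       acc ++ ws.map (fun word => String.ofList (word.toList.filter PySem.Chars.isalnum))) := by
  induction ws generalizing wc p acc with
  | nil => simp
  | cons w ws ih =>
    rw [List.foldl_cons]
    have h1 : pvStepA (wc, p, acc) w
        = (wc + 1, p + (w.toList.countP (· ∈ pvPunct) : Int),
           acc ++ [String.ofList (w.toList.filter PySem.Chars.isalnum)]) := by
      simp [pvStepA, pvInnerA]
    rw [h1, ih]
    simp only [Prod.mk.injEq, List.map_cons, List.flatten_cons, List.countP_append,
      List.length_cons]
    push_cast
    refine ⟨by ring, by ring, by simp⟩

-- counting membership in the five marks = summing the five individual counts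
theorem pvCountSplit (xs : List Char) :
    (xs.countP (· ∈ pvPunct) : Int)
      = (xs.count '.' : Int) + (xs.count '?' : Int) + (xs.count '!' : Int)
        + (xs.count ':' : Int) + (xs.count ';' : Int) := by
  induction xs with
  | nil => simp
  | cons c xs ih =>
    simp only [List.countP_cons, List.count_cons, pvPunct, List.mem_cons,
      List.not_mem_nil, or_false] at *
    push_cast at *
    split_ifs <;> first | omega | simp_all

-- B's nested dict-building loop is the counter of the flattened characters
theorem pvDictEq (ws : List String) (c : Char) :
    (ws.foldl
      (fun d word => word.toList.foldl (fun d c => d.insert c (d.getD c 0 + 1)) d)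
      (PySem.Dict.empty : PySem.Dict Char Int)).getD c 0
    = (((ws.map String.toList).flatten).count c : Int) := by
  rw [show (fun (d : PySem.Dict Char Int) (word : String) =>
        word.toList.foldl (fun d c => d.insert c (d.getD c 0 + 1)) d)
      = (fun d word => List.foldl (fun d c => d.insert c (d.getD c 0 + 1)) d word.toList) from rfl]
  rw [← List.foldl_map (f := String.toList), ← List.foldl_flatten,
      PySem.Dict.foldl_insert_getD_add_one_eq_counter, PySem.Dict.getD_counter]

-- ===== VERDICT (by name: the statement is the Claim_ definition above) =====
theorem punctuation_handler_spec : Claim_equal_punctuation_handler := by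
  intro word_list _
  unfold Spec_punctuation_handler punctuation_handler punctuation_handler_alt
  rw [pvOuterA, pvCountSplit]
  simp only [pvPunct, List.map_cons, List.map_nil, List.sum_cons, List.sum_nil, pvDictEq,
    Prod.mk.injEq]
  refine ⟨by ring, by simp⟩
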